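-- pv_equiv track=rewrite | github.com/L-Zhe/ViPG | preprocess.py | extract_noun
-- ===== SOURCE A (Python) =====
-- def extract_noun(seq, end_flag):
--     noun_tag = []
--     info_seq = []
--     flag = False
--     for i in range(len(seq)):
--         flag |= seq[i] == end_flag
--         if i == 0:
--             info_seq.append(seq[i])
--             noun_tag.append(seq[i])
--         else:
--             if (flag or i % 2 == 0):
--                 info_seq.append(seq[i])
--             else:
--                 noun_tag.append(seq[i])
--     return (info_seq, noun_tag)
-- ===== SOURCE B (Python) =====
-- def extract_noun(seq, end_flag):
--     if not seq:
--         return ([], [])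
--     n = len(seq)
--     p = next((i for i, x in enumerate(seq) if x == end_flag), n)
--     info_seq = [seq[0]] + [seq[i] for i in range(1, n) if i >= p or i % 2 == 0]
--     noun_tag = [seq[0]] + [seq[i] for i in range(1, p) if i % 2 == 1]
--     return (info_seq, noun_tag)
-- ===== Notes on version B (the rewrite author's own statement) =====
-- stated objective: simpler
-- what changed: B first locates the cut point p (the first index holding end_flag) and then builds the two output lists with two shaped index comprehensions, instead of A's single fused pass threading a running boolean flag and two accumulators.
import Mathlib
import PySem

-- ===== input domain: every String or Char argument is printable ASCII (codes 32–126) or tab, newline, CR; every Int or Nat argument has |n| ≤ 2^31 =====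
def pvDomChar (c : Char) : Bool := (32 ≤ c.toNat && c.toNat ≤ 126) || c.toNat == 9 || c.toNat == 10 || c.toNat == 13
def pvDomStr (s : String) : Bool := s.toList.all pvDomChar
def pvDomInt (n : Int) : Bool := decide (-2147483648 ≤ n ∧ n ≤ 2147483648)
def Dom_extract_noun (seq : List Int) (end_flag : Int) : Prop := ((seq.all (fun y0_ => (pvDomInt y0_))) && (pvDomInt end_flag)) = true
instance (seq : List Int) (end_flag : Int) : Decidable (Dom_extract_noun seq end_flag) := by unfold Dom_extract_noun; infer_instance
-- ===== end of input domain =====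

-- B replaces A's single fused pass with a running boolean flag by: find the cut index p first,
-- then build the two lists with two shaped index comprehensions (objective: simpler decomposition).

-- ===== PORT A =====
-- the for-loop over range(len(seq)) with three mutable accumulators, as structural recursion on the index
def extractNounGoA (seq : List Int) (end_flag : Int) (i : Nat) (info noun : List Int) (flag : Bool) :
    List Int × List Int :=
  if _h : i < seq.length then
    let x := seq.getD i 0        -- seq[i]; i is in range here, so getD is exact
    let flag := flag || decide (x = end_flag)
    if i = 0 then
      extractNounGoA seq end_flag (i+1) (info ++ [x]) (noun ++ [x]) flag
    else if flag || decide (i % 2 = 0) then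
      extractNounGoA seq end_flag (i+1) (info ++ [x]) noun flag
    else
      extractNounGoA seq end_flag (i+1) info (noun ++ [x]) flag
  else (info, noun)
termination_by seq.length - i

def extract_noun (seq : List Int) (end_flag : Int) : List Int × List Int :=
  extractNounGoA seq end_flag 0 [] [] false

-- ===== PORT B =====
def extract_noun_alt (seq : List Int) (end_flag : Int) : List Int × List Int :=
  match seq with
  | [] => ([], [])
  | x :: _ =>
    let n := seq.length
    let p := seq.findIdx (fun y => y == end_flag)   -- next((i for i,x in enumerate(seq) if x==end_flag), n)
    let info := x :: ((List.range' 1 (n-1)).filter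
        (fun i => decide (p ≤ i) || decide (i % 2 = 0))).map (fun i => seq.getD i 0)
    let noun := x :: ((List.range' 1 (p-1)).filter
        (fun i => decide (i % 2 = 1))).map (fun i => seq.getD i 0)
    (info, noun)

-- ===== PRECONDITION & SPEC =====
def Spec_extract_noun (seq : List Int) (end_flag : Int) (out : List Int × List Int) : Prop := out = extract_noun_alt seq end_flag
instance (seq : List Int) (end_flag : Int) (out : List Int × List Int) : Decidable (Spec_extract_noun seq end_flag out) := by unfold Spec_extract_noun; infer_instance

-- ===== CLAIM (what is proved, stated in full; the proofs are below) =====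
def Claim_equal_extract_noun : Prop := ∀ (seq : List Int) (end_flag : Int), Dom_extract_noun seq end_flag → Spec_extract_noun seq end_flag (extract_noun seq end_flag)

-- ===== LEMMAS AND PROOFS =====

-- once the flag is true, everything from index i on goes to info
theorem extractNounGoA_true (seq : List Int) (end_flag : Int) :
    ∀ (k i : Nat) (info noun : List Int), seq.length - i = k → 1 ≤ i →
    extractNounGoA seq end_flag i info noun true =
      (info ++ (List.range' i (seq.length - i)).map (fun j => seq.getD j 0), noun) := by
  intro k
  induction k with
  | zero =>
    intro i info noun hk hi
    rw [extractNounGoA]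
    have hni : ¬ i < seq.length := by omega
    simp [hni, hk]
  | succ k ih =>
    intro i info noun hk hi
    have hin : i < seq.length := by omega
    rw [extractNounGoA]
    have hi0 : ¬ i = 0 := by omega
    simp only [dif_pos hin, if_neg hi0, Bool.true_or]
    rw [ih (i+1) _ _ (by omega) (by omega)]
    rw [hk, List.range'_succ]
    have : seq.length - (i+1) = k := by omega
    simp [this, List.append_assoc]

-- with the flag still false entering index i (so the first end_flag occurrence p is ≥ i):
-- info gets the indices j ≥ p or even, noun the odd indices below p
theorem extractNounGoA_false (seq : List Int) (end_flag : Int) :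
    ∀ (k i : Nat) (info noun : List Int), seq.length - i = k → 1 ≤ i →
    i ≤ seq.findIdx (fun y => y == end_flag) →
    extractNounGoA seq end_flag i info noun false =
      (info ++ ((List.range' i (seq.length - i)).filter
          (fun j => decide (seq.findIdx (fun y => y == end_flag) ≤ j) || decide (j % 2 = 0))).map
          (fun j => seq.getD j 0),
       noun ++ ((List.range' i (seq.findIdx (fun y => y == end_flag) - i)).filter
          (fun j => decide (j % 2 = 1))).map (fun j => seq.getD j 0)) := by
  intro k
  set p := seq.findIdx (fun y => y == end_flag) with hp
  have hpn : p ≤ seq.length := List.findIdx_le_length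
  induction k with
  | zero =>
    intro i info noun hk hi hip
    rw [extractNounGoA]
    have hni : ¬ i < seq.length := by omega
    have hpi : p - i = 0 := by omega
    simp [hni, hk, hpi]
  | succ k ih =>
    intro i info noun hk hi hip
    have hin : i < seq.length := by omega
    have hk1 : seq.length - (i+1) = k := by omega
    rw [extractNounGoA]
    have hi0 : ¬ i = 0 := by omega
    simp only [dif_pos hin, if_neg hi0]
    have hget : seq.getD i 0 = seq[i] := List.getD_eq_getElem seq 0 hin
    by_cases hx : seq.getD i 0 = end_flag
    · -- first occurrence found here: p = i, flag becomes true
      have hxE : seq[i] = end_flag := hget ▸ hx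
      have hpi : p = i := by
        by_contra hne
        have hlt : i < p := by omega
        have := List.not_of_lt_findIdx (p := fun y => y == end_flag) (xs := seq) hlt
        simp only [beq_eq_false_iff_ne, ne_eq] at this
        exact this hxE
      simp only [hx, decide_true, Bool.false_or, Bool.true_or]
      rw [extractNounGoA_true seq end_flag (seq.length - (i+1)) (i+1) _ _ rfl (by omega)]
      rw [hk, List.range'_succ]
      have hfilt : (List.range' (i+1) k).filter
          (fun j => decide (p ≤ j) || decide (j % 2 = 0)) = List.range' (i+1) k := by
        rw [List.filter_eq_self]
        intro a ha
        have := (List.mem_range'_1.mp ha).1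
        simp; omega
      simp only [List.filter_cons, hk1]
      have : (decide (p ≤ i) || decide (i % 2 = 0)) = true := by simp; omega
      rw [this, hfilt]
      have hpi0 : p - i = 0 := by omega
      have hx2 : seq[i]?.getD 0 = end_flag := by simpa using hx
      simp [hpi0, List.append_assoc, hx2]
    · -- no occurrence yet: i < p, flag stays false
      have hxE : ¬ seq[i] = end_flag := hget ▸ hx
      have hlt : i < p := by
        rcases Nat.lt_or_ge i p with h | h
        · exact h
        · have hpi : p = i := by omega
          have hplen : seq.findIdx (fun y => y == end_flag) < seq.length := by omega
          have := List.findIdx_getElem (p := fun y => y == end_flag) (xs := seq) (w := hplen)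
          simp only [← hp, hpi, beq_iff_eq] at this
          exact (hxE this).elim
      simp only [hx, decide_false, Bool.false_or]
      rw [hk, List.range'_succ]
      have hpcons : p - i = (p - (i+1)) + 1 := by omega
      by_cases he : i % 2 = 0
      · simp only [he, decide_true]
        rw [ih (i+1) _ _ hk1 (by omega) (by omega)]
        simp only [List.filter_cons, hk1, hpcons, List.range'_succ]
        have h1 : (decide (p ≤ i) || decide (i % 2 = 0)) = true := by simp [he]
        have h2 : (decide (i % 2 = 1)) = false := by simp; omega
        rw [h1, h2]
        simp [List.append_assoc]
      · simp only [he, decide_false, if_neg (by simp : ¬ (false : Bool) = true)]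
        rw [ih (i+1) _ _ hk1 (by omega) (by omega)]
        simp only [List.filter_cons, hk1, hpcons, List.range'_succ]
        have h1 : (decide (p ≤ i) || decide (i % 2 = 0)) = false := by simp; omega
        have h2 : (decide (i % 2 = 1)) = true := by simp; omega
        rw [h1, h2]
        simp [List.append_assoc]

-- ===== VERDICT (by name: the statement is the Claim_ definition above) =====
theorem extract_noun_spec : Claim_equal_extract_noun := by
  intro seq end_flag _
  unfold Spec_extract_noun
  cases seq with
  | nil => rw [extract_noun, extractNounGoA]; simp [extract_noun_alt]
  | cons x t =>
    have step0 : extract_noun (x :: t) end_flag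
        = extractNounGoA (x :: t) end_flag 1 [x] [x] (decide (x = end_flag)) := by
      rw [extract_noun, extractNounGoA]; simp
    rw [step0]
    set p := (x :: t).findIdx (fun y => y == end_flag) with hp
    by_cases hx : x = end_flag
    · -- p = 0, the flag is true from the start
      have hp0 : p = 0 := by rw [hp, List.findIdx_cons]; simp [hx]
      rw [show decide (x = end_flag) = true by simp [hx]]
      rw [extractNounGoA_true (x :: t) end_flag ((x :: t).length - 1) 1 _ _ rfl (by omega)]
      have hfilt : (List.range' 1 ((x :: t).length - 1)).filter
          (fun i => decide (p ≤ i) || decide (i % 2 = 0)) = List.range' 1 ((x :: t).length - 1) := by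
        rw [List.filter_eq_self]; intro a _; simp; omega
      simp [extract_noun_alt, ← hp, hp0]
    · -- p ≥ 1, the flag is false entering index 1
      have hp1 : 1 ≤ p := by
        have hbx : (x == end_flag) = false := by simp [hx]
        rw [hp, List.findIdx_cons, hbx, cond_false]
        omega
      rw [show decide (x = end_flag) = false by simp [hx]]
      rw [extractNounGoA_false (x :: t) end_flag ((x :: t).length - 1) 1 _ _ rfl (by omega)
        (by rw [← hp]; omega)]
      simp [extract_noun_alt, ← hp]
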